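-- pv_equiv track=rewrite | github.com/Syedtalhaalam/unspsc_classifier | unspsc-classifier-code/unspsc_classifier_v10.py | _apply_consensus
-- ===== SOURCE A (Python) =====
-- from typing import Any, Dict, List, Optional, Set, Tuple
--
-- def _apply_consensus(
--
--     gpt_code: Optional[str],
--     gemini_code: Optional[str],
--     claude_code: Optional[str]
-- ) -> Tuple[Optional[str], str]:
--     """Step 5: Apply consensus logic per user requirements.
--
--     Scenarios:
--     1. If all 3/3 agree → use that code
--     2. If 2/3 agree → use that code (even if one LLM returned None)
--     3. If all different → use ChatGPT (if available), else Gemini, else Claude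
--
--     IMPORTANT: If any LLM returns None, consensus should still work with remaining LLMs.
--     """
--     codes = [c for c in [gpt_code, gemini_code, claude_code] if c]
--
--     if not codes:
--         return None, "no_valid_codes"
--
--     # Count votes among non-None codes
--     from collections import Counter
--     vote_counts = Counter(codes)
--     most_common = vote_counts.most_common(1)[0]
--     winner_code, winner_votes = most_common
--
--     # 3/3 consensus (all three returned same code)
--     if winner_votes == 3:
--         return winner_code, "3_of_3_consensus"
--
--     # 2/3 consensus (two LLMs agreed, including cases where one returned None)
--     if winner_votes == 2:
--         return winner_code, "2_of_3_consensus"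
--
--     # All different or only 1-2 LLMs responded with different codes
--     # Priority: ChatGPT > Gemini > Claude
--     if gpt_code:
--         return gpt_code, "chatgpt_fallback"
--     elif gemini_code:
--         return gemini_code, "gemini_fallback"
--     elif claude_code:
--         return claude_code, "claude_fallback"
--
--     # Fallback (should never reach here given earlier checks)
--     return winner_code, "fallback_most_common"
-- ===== SOURCE B (Python) =====
-- def _apply_consensus(gpt_code, gemini_code, claude_code):
--     # normalize: treat None and "" both as absent
--     g = gpt_code if gpt_code else None
--     m = gemini_code if gemini_code else None
--     c = claude_code if claude_code else None
--     if g is None and m is None and c is None: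
--         return None, "no_valid_codes"
--     # 3/3: all three present and equal
--     if g is not None and g == m and g == c:
--         return g, "3_of_3_consensus"
--     # 2/3: some pair of present codes equal
--     if g is not None and g == m:
--         return g, "2_of_3_consensus"
--     if g is not None and g == c:
--         return g, "2_of_3_consensus"
--     if m is not None and m == c:
--         return m, "2_of_3_consensus"
--     # all different: priority ChatGPT > Gemini > Claude
--     if g is not None:
--         return g, "chatgpt_fallback"
--     if m is not None:
--         return m, "gemini_fallback"
--     return c, "claude_fallback"
-- ===== Notes on version B (the rewrite author's own statement) =====
-- stated objective: simpler
-- what changed: Replaces the Counter/most_common vote tally with direct pairwise equality tests on the three (truthiness-normalized) codes: all-equal gives 3/3, any equal pair gives 2/3, otherwise the same ChatGPT>Gemini>Claude priority fallback; no counts or dict are maintained.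
import Mathlib
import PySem

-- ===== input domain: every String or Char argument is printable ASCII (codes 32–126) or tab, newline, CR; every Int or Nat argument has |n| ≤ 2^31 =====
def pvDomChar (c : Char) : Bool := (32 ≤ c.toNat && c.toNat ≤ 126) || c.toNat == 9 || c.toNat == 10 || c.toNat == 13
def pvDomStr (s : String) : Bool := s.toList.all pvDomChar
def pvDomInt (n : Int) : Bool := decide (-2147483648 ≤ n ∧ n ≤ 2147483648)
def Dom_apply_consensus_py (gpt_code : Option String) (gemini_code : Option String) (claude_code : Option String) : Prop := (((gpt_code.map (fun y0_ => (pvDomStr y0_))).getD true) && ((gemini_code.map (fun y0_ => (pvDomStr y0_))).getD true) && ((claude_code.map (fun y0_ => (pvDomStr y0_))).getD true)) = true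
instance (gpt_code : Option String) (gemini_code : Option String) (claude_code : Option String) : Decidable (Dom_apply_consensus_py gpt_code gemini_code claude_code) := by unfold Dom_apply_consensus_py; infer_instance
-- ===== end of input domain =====

-- B replaces A's Counter/most_common vote count by direct pairwise equality tests on the
-- normalized three codes (objective: simpler).

-- ===== PORT A =====
-- truthiness filter of the comprehension: `if c` keeps non-None, non-empty strings
def pvKeep (c : Option String) : Option String :=
  match c with
  | none => none
  | some s => if s ≠ "" then some s else none

def apply_consensus_py (gpt_code : Option String) (gemini_code : Option String) (claude_code : Option String) : Option String × String :=
  let codes : List String := [gpt_code, gemini_code, claude_code].filterMap pvKeep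
  if codes = [] then (none, "no_valid_codes")
  else
    let vote_counts := PySem.Dict.counter codes
    -- most_common(1)[0]: first item (insertion order) with maximal count
    let most_common :=
      vote_counts.items.foldl (fun best p => if p.2 > best.2 then p else best)
        (vote_counts.items.headD ("", 0))
    let winner_code := most_common.1
    let winner_votes := most_common.2
    if winner_votes = 3 then (some winner_code, "3_of_3_consensus")
    else if winner_votes = 2 then (some winner_code, "2_of_3_consensus")
    else if (pvKeep gpt_code).isSome then (gpt_code, "chatgpt_fallback")
    else if (pvKeep gemini_code).isSome then (gemini_code, "gemini_fallback")
    else if (pvKeep claude_code).isSome then (claude_code, "claude_fallback")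
    else (some winner_code, "fallback_most_common")

-- ===== PORT B =====
def apply_consensus_py_alt (gpt_code : Option String) (gemini_code : Option String) (claude_code : Option String) : Option String × String :=
  let g := pvKeep gpt_code
  let m := pvKeep gemini_code
  let c := pvKeep claude_code
  if g = none ∧ m = none ∧ c = none then (none, "no_valid_codes")
  else if g ≠ none ∧ g = m ∧ g = c then (g, "3_of_3_consensus")
  else if g ≠ none ∧ g = m then (g, "2_of_3_consensus")
  else if g ≠ none ∧ g = c then (g, "2_of_3_consensus")
  else if m ≠ none ∧ m = c then (m, "2_of_3_consensus")
  else if g ≠ none then (g, "chatgpt_fallback")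
  else if m ≠ none then (m, "gemini_fallback")
  else (c, "claude_fallback")

-- ===== PRECONDITION & SPEC =====
def Spec_apply_consensus_py (gpt_code : Option String) (gemini_code : Option String) (claude_code : Option String) (out : Option String × String) : Prop := out = apply_consensus_py_alt gpt_code gemini_code claude_code
instance (gpt_code : Option String) (gemini_code : Option String) (claude_code : Option String) (out : Option String × String) : Decidable (Spec_apply_consensus_py gpt_code gemini_code claude_code out) := by unfold Spec_apply_consensus_py; infer_instance

-- ===== CLAIM (what is proved, stated in full; the proofs are below) =====
def Claim_equal_apply_consensus_py : Prop := ∀ (gpt_code : Option String) (gemini_code : Option String) (claude_code : Option String), Dom_apply_consensus_py gpt_code gemini_code claude_code → Spec_apply_consensus_py gpt_code gemini_code claude_code (apply_consensus_py gpt_code gemini_code claude_code)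

-- ===== LEMMAS AND PROOFS =====

-- Both sides depend on the inputs only through (pvKeep gpt, pvKeep gem, pvKeep cla),
-- where each normalized value is none or some of a nonempty string.
theorem apply_consensus_main (gpt_code gemini_code claude_code : Option String) :
    apply_consensus_py gpt_code gemini_code claude_code
      = apply_consensus_py_alt gpt_code gemini_code claude_code := by
  rcases gpt_code with _ | a
  · rcases gemini_code with _ | b
    · rcases claude_code with _ | d
      · simp [apply_consensus_py, apply_consensus_py_alt, pvKeep, PySem.Dict.items_counter, PySem.Set.ofList, PySem.Set.add, List.count_cons]
      · by_cases hd : d = "" <;> simp [apply_consensus_py, apply_consensus_py_alt, pvKeep, PySem.Dict.items_counter, PySem.Set.ofList, PySem.Set.add, List.count_cons, hd]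
    · rcases claude_code with _ | d
      · by_cases hb : b = "" <;> simp [apply_consensus_py, apply_consensus_py_alt, pvKeep, PySem.Dict.items_counter, PySem.Set.ofList, PySem.Set.add, List.count_cons, hb]
      · by_cases hb : b = "" <;> by_cases hd : d = ""
        · simp [apply_consensus_py, apply_consensus_py_alt, pvKeep, PySem.Dict.items_counter, PySem.Set.ofList, PySem.Set.add, List.count_cons, hb, hd]
        · simp [apply_consensus_py, apply_consensus_py_alt, pvKeep, PySem.Dict.items_counter, PySem.Set.ofList, PySem.Set.add, List.count_cons, hb, hd]
        · simp [apply_consensus_py, apply_consensus_py_alt, pvKeep, PySem.Dict.items_counter, PySem.Set.ofList, PySem.Set.add, List.count_cons, hb, hd]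
        · by_cases hbd : b = d
          · subst hbd; simp [apply_consensus_py, apply_consensus_py_alt, pvKeep, PySem.Dict.items_counter, PySem.Set.ofList, PySem.Set.add, List.count_cons, hb, hd]
          · simp [apply_consensus_py, apply_consensus_py_alt, pvKeep, PySem.Dict.items_counter, PySem.Set.ofList, PySem.Set.add, List.count_cons, hb, hd, hbd, Ne.symm hbd]
  · rcases gemini_code with _ | b
    · rcases claude_code with _ | d
      · by_cases ha : a = "" <;> simp [apply_consensus_py, apply_consensus_py_alt, pvKeep, PySem.Dict.items_counter, PySem.Set.ofList, PySem.Set.add, List.count_cons, ha]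
      · by_cases ha : a = "" <;> by_cases hd : d = ""
        · simp [apply_consensus_py, apply_consensus_py_alt, pvKeep, PySem.Dict.items_counter, PySem.Set.ofList, PySem.Set.add, List.count_cons, ha, hd]
        · simp [apply_consensus_py, apply_consensus_py_alt, pvKeep, PySem.Dict.items_counter, PySem.Set.ofList, PySem.Set.add, List.count_cons, ha, hd]
        · simp [apply_consensus_py, apply_consensus_py_alt, pvKeep, PySem.Dict.items_counter, PySem.Set.ofList, PySem.Set.add, List.count_cons, ha, hd]
        · by_cases had : a = d
          · subst had; simp [apply_consensus_py, apply_consensus_py_alt, pvKeep, PySem.Dict.items_counter, PySem.Set.ofList, PySem.Set.add, List.count_cons, ha, hd]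
          · simp [apply_consensus_py, apply_consensus_py_alt, pvKeep, PySem.Dict.items_counter, PySem.Set.ofList, PySem.Set.add, List.count_cons, ha, hd, had, Ne.symm had]
    · rcases claude_code with _ | d
      · by_cases ha : a = "" <;> by_cases hb : b = ""
        · simp [apply_consensus_py, apply_consensus_py_alt, pvKeep, PySem.Dict.items_counter, PySem.Set.ofList, PySem.Set.add, List.count_cons, ha, hb]
        · simp [apply_consensus_py, apply_consensus_py_alt, pvKeep, PySem.Dict.items_counter, PySem.Set.ofList, PySem.Set.add, List.count_cons, ha, hb]
        · simp [apply_consensus_py, apply_consensus_py_alt, pvKeep, PySem.Dict.items_counter, PySem.Set.ofList, PySem.Set.add, List.count_cons, ha, hb]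
        · by_cases hab : a = b
          · subst hab; simp [apply_consensus_py, apply_consensus_py_alt, pvKeep, PySem.Dict.items_counter, PySem.Set.ofList, PySem.Set.add, List.count_cons, ha, hb]
          · simp [apply_consensus_py, apply_consensus_py_alt, pvKeep, PySem.Dict.items_counter, PySem.Set.ofList, PySem.Set.add, List.count_cons, ha, hb, hab, Ne.symm hab]
      · by_cases ha : a = "" <;> by_cases hb : b = "" <;> by_cases hd : d = ""
        · simp [apply_consensus_py, apply_consensus_py_alt, pvKeep, PySem.Dict.items_counter, PySem.Set.ofList, PySem.Set.add, List.count_cons, ha, hb, hd]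
        · simp [apply_consensus_py, apply_consensus_py_alt, pvKeep, PySem.Dict.items_counter, PySem.Set.ofList, PySem.Set.add, List.count_cons, ha, hb, hd]
        · simp [apply_consensus_py, apply_consensus_py_alt, pvKeep, PySem.Dict.items_counter, PySem.Set.ofList, PySem.Set.add, List.count_cons, ha, hb, hd]
        · by_cases hbd : b = d
          · subst hbd; simp [apply_consensus_py, apply_consensus_py_alt, pvKeep, PySem.Dict.items_counter, PySem.Set.ofList, PySem.Set.add, List.count_cons, ha, hb, hd]
          · simp [apply_consensus_py, apply_consensus_py_alt, pvKeep, PySem.Dict.items_counter, PySem.Set.ofList, PySem.Set.add, List.count_cons, ha, hb, hd, hbd, Ne.symm hbd]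
        · simp [apply_consensus_py, apply_consensus_py_alt, pvKeep, PySem.Dict.items_counter, PySem.Set.ofList, PySem.Set.add, List.count_cons, ha, hb, hd]
        · by_cases had : a = d
          · subst had; simp [apply_consensus_py, apply_consensus_py_alt, pvKeep, PySem.Dict.items_counter, PySem.Set.ofList, PySem.Set.add, List.count_cons, ha, hb, hd]
          · simp [apply_consensus_py, apply_consensus_py_alt, pvKeep, PySem.Dict.items_counter, PySem.Set.ofList, PySem.Set.add, List.count_cons, ha, hb, hd, had, Ne.symm had]
        · by_cases hab : a = b
          · subst hab; simp [apply_consensus_py, apply_consensus_py_alt, pvKeep, PySem.Dict.items_counter, PySem.Set.ofList, PySem.Set.add, List.count_cons, ha, hb, hd]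
          · simp [apply_consensus_py, apply_consensus_py_alt, pvKeep, PySem.Dict.items_counter, PySem.Set.ofList, PySem.Set.add, List.count_cons, ha, hb, hd, hab, Ne.symm hab]
        · by_cases hab : a = b
          · subst hab
            by_cases had : a = d
            · subst had; simp [apply_consensus_py, apply_consensus_py_alt, pvKeep, PySem.Dict.items_counter, PySem.Set.ofList, PySem.Set.add, List.count_cons, ha, hd]
            · simp [apply_consensus_py, apply_consensus_py_alt, pvKeep, PySem.Dict.items_counter, PySem.Set.ofList, PySem.Set.add, List.count_cons, ha, hd, had, Ne.symm had]
          · by_cases had : a = d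
            · subst had
              simp [apply_consensus_py, apply_consensus_py_alt, pvKeep, PySem.Dict.items_counter, PySem.Set.ofList, PySem.Set.add, List.count_cons, ha, hb, hab, Ne.symm hab]
            · by_cases hbd : b = d
              · subst hbd; simp [apply_consensus_py, apply_consensus_py_alt, pvKeep, PySem.Dict.items_counter, PySem.Set.ofList, PySem.Set.add, List.count_cons, ha, hb, hab, had, Ne.symm hab, Ne.symm had]
              · simp [apply_consensus_py, apply_consensus_py_alt, pvKeep, PySem.Dict.items_counter, PySem.Set.ofList, PySem.Set.add, List.count_cons, ha, hb, hd, hab, had, hbd, Ne.symm hab, Ne.symm had, Ne.symm hbd]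

-- ===== VERDICT (by name: the statement is the Claim_ definition above) =====
theorem apply_consensus_py_spec : Claim_equal_apply_consensus_py := by
  intro g m c _
  exact apply_consensus_main g m c
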